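-- pv_equiv track=rewrite | github.com/TrellixVulnTeam/CMPUT_274_Exercises_KYO3 | Exercise_4/preprocess/preprocess.py | both_present
-- ===== SOURCE A (Python) =====
-- def both_present(word: str):
--     '''Returns true if both integers and characters are present in word
--     '''
--     digits = "0123456789"
--     alphabets = "ABCDEFGHIJKLMNOPQRSTUVWXYZabcdefghijklmnopqrstuvwxyz"
--     symbols = "~!@#$%^&*()_-+=`<>?/.,\|}{[]''"":;"
--
--     d = False
--     a = False
--
--     for char in word:
--     	if char in digits:
--     	    d = True
--     	if (char in alphabets) or (char in symbols):
--     	    a = True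
--     return (d and a)
-- ===== SOURCE B (Python) =====
-- def both_present(word: str):
--     '''Returns true if both integers and characters are present in word
--     '''
--     digits = "0123456789"
--     alphabets = "ABCDEFGHIJKLMNOPQRSTUVWXYZabcdefghijklmnopqrstuvwxyz"
--     symbols = "~!@#$%^&*()_-+=`<>?/.,\|}{[]''"":;"
--     present = set(word)
--     d = bool(present & set(digits))
--     a = bool(present & (set(alphabets) | set(symbols)))
--     return d and a
-- ===== Notes on version B (the rewrite author's own statement) =====
-- stated objective: faster
-- what changed: Replaces the per-character flag loop doing linear scans of the three class strings by one set(word) construction and two set-intersection tests against the same literal character classes.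
import Mathlib
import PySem

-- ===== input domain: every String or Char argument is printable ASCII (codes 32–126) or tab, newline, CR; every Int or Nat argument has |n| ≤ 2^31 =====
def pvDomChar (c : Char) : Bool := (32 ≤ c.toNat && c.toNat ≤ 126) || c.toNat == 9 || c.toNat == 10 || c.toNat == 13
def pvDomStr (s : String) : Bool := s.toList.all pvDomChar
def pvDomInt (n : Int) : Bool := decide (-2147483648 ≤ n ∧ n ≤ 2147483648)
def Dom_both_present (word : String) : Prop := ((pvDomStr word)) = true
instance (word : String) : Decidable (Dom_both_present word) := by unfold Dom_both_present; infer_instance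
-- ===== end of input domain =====

-- B replaces A's per-character flag loop by set(word) and set intersections with the same literal classes (idiomatic; same behaviour).

-- ===== PORT A =====
-- the three literal character classes of the Python source (adjacent string
-- literals in symbols concatenate; '\|' is backslash+pipe)
def pvDigits : List Char := "0123456789".toList
def pvAlphabets : List Char := "ABCDEFGHIJKLMNOPQRSTUVWXYZabcdefghijklmnopqrstuvwxyz".toList
def pvSymbols : List Char := "~!@#$%^&*()_-+=`<>?/.,\\|}{[]'':;".toList

-- the loop body: the two 'if's updating the flags (d, a), in source order
def pvStep (s : Bool × Bool) (char : Char) : Bool × Bool :=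
  let s := if pvDigits.contains char then (true, s.2) else s
  if pvAlphabets.contains char || pvSymbols.contains char then (s.1, true) else s

def both_present (word : String) : Bool :=
  let r := word.toList.foldl pvStep (false, false)
  r.1 && r.2

-- ===== PORT B =====
def both_present_alt (word : String) : Bool :=
  let present : PySem.Set Char := PySem.Set.ofList word.toList
  let d := !(PySem.Set.inter present (PySem.Set.ofList pvDigits)).isEmpty
  let a := !(PySem.Set.inter present
              (PySem.Set.union (PySem.Set.ofList pvAlphabets) pvSymbols)).isEmpty
  d && a

-- ===== PRECONDITION & SPEC =====
def Spec_both_present (word : String) (out : Bool) : Prop := out = both_present_alt word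
instance (word : String) (out : Bool) : Decidable (Spec_both_present word out) := by unfold Spec_both_present; infer_instance

-- ===== CLAIM (what is proved, stated in full; the proofs are below) =====
def Claim_equal_both_present : Prop := ∀ (word : String), Dom_both_present word → Spec_both_present word (both_present word)

-- ===== LEMMAS AND PROOFS =====

-- A's loop computes the two 'any' flags
theorem pv_loop_eq (l : List Char) (d a : Bool) :
    l.foldl pvStep (d, a)
    = (d || l.any (fun c => pvDigits.contains c),
       a || l.any (fun c => pvAlphabets.contains c || pvSymbols.contains c)) := by
  induction l generalizing d a with
  | nil => simp
  | cons c l ih =>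
      rw [List.foldl_cons, ih]
      simp only [List.any_cons, pvStep]
      by_cases hd : c ∈ pvDigits <;> by_cases h1 : c ∈ pvAlphabets <;>
        by_cases h2 : c ∈ pvSymbols <;>
        simp [hd, h1, h2]

-- B's nonempty-intersection test is 'any' of membership in t over the word
theorem pv_inter_any (l t : List Char) :
    (!(PySem.Set.inter (PySem.Set.ofList l) t).isEmpty)
    = l.any (fun c => t.contains c) := by
  have h : PySem.Set.inter (PySem.Set.ofList l) t
      = (PySem.Set.ofList l).filter (fun x => t.contains x) := rfl
  rw [h]
  rcases hb : l.any (fun c => t.contains c) with _ | _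
  · simp only [List.any_eq_false] at hb
    have hnil : (PySem.Set.ofList l).filter (fun x => t.contains x) = [] := by
      rw [List.filter_eq_nil_iff]
      intro x hx
      simpa using hb x ((PySem.Set.mem_ofList l x).mp hx)
    rw [hnil]
    rfl
  · simp only [List.any_eq_true] at hb
    obtain ⟨x, hx, hpx⟩ := hb
    have hm : x ∈ (PySem.Set.ofList l).filter (fun x => t.contains x) :=
      List.mem_filter.mpr ⟨(PySem.Set.mem_ofList l x).mpr hx, hpx⟩
    rcases hf : (PySem.Set.ofList l).filter (fun x => t.contains x) with _ | _
    · rw [hf] at hm; cases hm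
    · simp

-- membership test in set(xs) | ys agrees with the two list tests
theorem pv_union_contains (xs ys : List Char) (c : Char) :
    (PySem.Set.union (PySem.Set.ofList xs) ys).contains c
    = (xs.contains c || ys.contains c) := by
  rw [Bool.eq_iff_iff]
  simp [PySem.Set.mem_union, PySem.Set.mem_ofList]

-- ===== VERDICT (by name: the statement is the Claim_ definition above) =====
set_option maxRecDepth 8192 in
theorem both_present_spec : Claim_equal_both_present := by
  intro word _
  unfold Spec_both_present both_present both_present_alt
  simp only [pv_loop_eq, pv_inter_any, Bool.false_or]
  congr 1
  · exact List.any_congr rfl (fun c => (pv_union_contains pvAlphabets pvSymbols c).symm)
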